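-- pv_equiv track=rewrite | github.com/plan-reuse/subtask_reuse | old_code/llm_subtask_v2.py | parse_subtasks_and_goals
-- ===== SOURCE A (Python) =====
-- def parse_subtasks_and_goals(plan_text):
--     """Parse the generated plan text to extract subtasks and PDDL goals"""
--     lines = plan_text.strip().split('\n')
--     subtasks = []
--     pddl_goals = []
--
--     current_subtask = ""
--     current_goal = ""
--
--     for line in lines:
--         line = line.strip()
--         if line.startswith("Subtask"):
--             if current_subtask and current_goal:
--                 subtasks.append(current_subtask)
--                 pddl_goals.append(current_goal)
--             current_subtask = line.split(":", 1)[1].strip() if ":" in line else ""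
--             current_goal = ""
--         elif line.startswith("PDDL Goal"):
--             current_goal = line.split(":", 1)[1].strip() if ":" in line else ""
--
--     # Add the last pair
--     if current_subtask and current_goal:
--         subtasks.append(current_subtask)
--         pddl_goals.append(current_goal)
--
--     return subtasks, pddl_goals
-- ===== SOURCE B (Python) =====
-- def _value(line):
--     return line.split(":", 1)[1].strip() if ":" in line else ""
--
--
-- def _blocks(lines):
--     """Cut a line list whose first line is a Subtask header into
--     (header, body) blocks, one per Subtask header."""
--     blocks = []
--     i = 0
--     n = len(lines)
--     while i < n:
--         j = i + 1
--         while j < n and not lines[j].startswith("Subtask"):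
--             j += 1
--         blocks.append((lines[i], lines[i + 1:j]))
--         i = j
--     return blocks
--
--
-- def parse_subtasks_and_goals(plan_text):
--     lines = [ln.strip() for ln in plan_text.strip().split('\n')]
--     # drop the preamble before the first Subtask header
--     k = 0
--     while k < len(lines) and not lines[k].startswith("Subtask"):
--         k += 1
--     subtasks, goals = [], []
--     for header, body in _blocks(lines[k:]):
--         sub = _value(header)
--         glines = [ln for ln in body if ln.startswith("PDDL Goal")]
--         goal = _value(glines[-1]) if glines else ""
--         if sub and goal:
--             subtasks.append(sub)
--             goals.append(goal)
--     return subtasks, goals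
-- ===== Notes on version B (the rewrite author's own statement) =====
-- stated objective: alternative
-- what changed: Replaces A's single streaming loop with mutable current_subtask/current_goal state and deferred flushes by a two-phase decomposition: first cut the stripped lines into (header, body) blocks at the Subtask headers, then map each block to its pair (header value, value of the last PDDL Goal line in the body) and keep the pairs with both parts non-empty.
import Mathlib
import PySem

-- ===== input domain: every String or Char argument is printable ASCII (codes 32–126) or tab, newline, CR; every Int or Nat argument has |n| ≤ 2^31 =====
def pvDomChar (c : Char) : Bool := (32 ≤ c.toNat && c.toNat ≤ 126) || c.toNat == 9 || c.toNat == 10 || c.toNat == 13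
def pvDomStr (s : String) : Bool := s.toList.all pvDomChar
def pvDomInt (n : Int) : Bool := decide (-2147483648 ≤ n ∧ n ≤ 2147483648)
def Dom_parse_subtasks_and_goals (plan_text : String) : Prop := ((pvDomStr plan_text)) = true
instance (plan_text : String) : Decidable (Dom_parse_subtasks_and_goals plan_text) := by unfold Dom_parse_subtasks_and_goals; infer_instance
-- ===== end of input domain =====

-- B replaces A's streaming loop by a block decomposition (cut at Subtask headers,
-- then map each block to its pair); same cost, different structure ("alternative").


-- ===== PORT A =====
-- literal transliteration of A's streaming loop
-- A's loop body, verbatim (the state is (subtasks, pddl_goals, current_subtask, current_goal))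
def pvStepA (st : List String × List String × String × String) (line : String) :
    List String × List String × String × String :=
  let (subtasks, pddl_goals, current_subtask, current_goal) := st
  if PySem.Str.startswith line "Subtask" then
    let (subtasks', pddl_goals') :=
      if current_subtask ≠ "" ∧ current_goal ≠ "" then
        (subtasks ++ [current_subtask], pddl_goals ++ [current_goal])
      else (subtasks, pddl_goals)
    (subtasks', pddl_goals',
      (if PySem.Str.isIn ":" line then
        PySem.Str.strip ((PySem.List.pyGet? ((PySem.Str.splitMax? line ":" 1).getD []) 1).getD "")
      else ""), "")
  else if PySem.Str.startswith line "PDDL Goal" then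
    (subtasks, pddl_goals, current_subtask,
      if PySem.Str.isIn ":" line then
        PySem.Str.strip ((PySem.List.pyGet? ((PySem.Str.splitMax? line ":" 1).getD []) 1).getD "")
      else "")
  else st

-- A's final "add the last pair" flush, verbatim
def pvFlushA (st : List String × List String × String × String) : List String × List String :=
  let (subtasks, pddl_goals, current_subtask, current_goal) := st
  if current_subtask ≠ "" ∧ current_goal ≠ "" then
    (subtasks ++ [current_subtask], pddl_goals ++ [current_goal])
  else (subtasks, pddl_goals)

def parse_subtasks_and_goals (plan_text : String) : List String × List String :=
  let lines := (PySem.Str.split? (PySem.Str.strip plan_text) "\n").getD []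
  pvFlushA (lines.foldl (fun st line₀ => pvStepA st (PySem.Str.strip line₀)) ([], [], "", ""))

-- ===== PORT B =====
-- Source B's _value
def pvVal (line : String) : String :=
  if PySem.Str.isIn ":" line then
    PySem.Str.strip ((PySem.List.pyGet? ((PySem.Str.splitMax? line ":" 1).getD []) 1).getD "")
  else ""

def pvNotSub (l : String) : Bool := !(PySem.Str.startswith l "Subtask")

-- Source B's _blocks: the cursor scan i..j over the suffix is exactly takeWhile/dropWhile
-- of the non-header predicate on the tail (same left-to-right scan, same values)
def pvBlocks : List String → List (String × List String)
  | [] => []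
  | h :: rest =>
      (h, rest.takeWhile pvNotSub) :: pvBlocks (rest.dropWhile pvNotSub)
termination_by l => l.length
decreasing_by
  simp only [List.length_cons]
  exact Nat.lt_succ_of_le (List.length_dropWhile_le _ _)

def parse_subtasks_and_goals_alt (plan_text : String) : List String × List String :=
  let lines := ((PySem.Str.split? (PySem.Str.strip plan_text) "\n").getD []).map PySem.Str.strip
  -- the k-scan dropping the preamble before the first Subtask header is dropWhile
  let lines := lines.dropWhile pvNotSub
  (pvBlocks lines).foldl (fun (acc : List String × List String) blk =>
    let sub := pvVal blk.1
    let glines := blk.2.filter (fun ln => PySem.Str.startswith ln "PDDL Goal")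
    let goal := match glines.getLast? with | some g => pvVal g | none => ""
    if sub ≠ "" ∧ goal ≠ "" then (acc.1 ++ [sub], acc.2 ++ [goal]) else acc)
    ([], [])

-- ===== PRECONDITION & SPEC =====
def Spec_parse_subtasks_and_goals (plan_text : String) (out : List String × List String) : Prop := out = parse_subtasks_and_goals_alt plan_text
instance (plan_text : String) (out : List String × List String) : Decidable (Spec_parse_subtasks_and_goals plan_text out) := by unfold Spec_parse_subtasks_and_goals; infer_instance

-- ===== CLAIM (what is proved, stated in full; the proofs are below) =====
def Claim_equal_parse_subtasks_and_goals : Prop := ∀ (plan_text : String), Dom_parse_subtasks_and_goals plan_text → Spec_parse_subtasks_and_goals plan_text (parse_subtasks_and_goals plan_text)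

-- ===== LEMMAS AND PROOFS =====

-- proof-side abbreviations
def pvIsSub (l : String) : Bool := PySem.Str.startswith l "Subtask"
def pvIsGoal (l : String) : Bool := PySem.Str.startswith l "PDDL Goal"

def pvApp (x y : List String × List String) : List String × List String :=
  (x.1 ++ y.1, x.2 ++ y.2)

def pvEmit (cs cg : String) : List String × List String :=
  if cs ≠ "" ∧ cg ≠ "" then ([cs], [cg]) else ([], [])

def pvUpd (cg : String) (l : String) : String := if pvIsGoal l then pvVal l else cg

-- recursive characterisation of A's loop on the already-stripped lines
def pvProcA : List String → String → String → List String × List String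
  | [], cs, cg => pvEmit cs cg
  | l :: ls, cs, cg =>
      if pvIsSub l then pvApp (pvEmit cs cg) (pvProcA ls (pvVal l) "")
      else pvProcA ls cs (pvUpd cg l)

-- recursive characterisation of B's block fold
def pvRecB : List (String × List String) → List String × List String
  | [] => ([], [])
  | b :: bs =>
      pvApp (pvEmit (pvVal b.1)
        (match (b.2.filter pvIsGoal).getLast? with | some g => pvVal g | none => ""))
        (pvRecB bs)

theorem pvApp_nil_left (y : List String × List String) : pvApp ([], []) y = y := by
  simp [pvApp]

theorem pvApp_assoc (x y z : List String × List String) :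
    pvApp x (pvApp y z) = pvApp (pvApp x y) z := by
  simp [pvApp]

-- Lemma 1: the flushed fold is the accumulator pair followed by pvProcA
theorem pvFoldA_eq (ls : List String) :
    ∀ (ss gs : List String) (cs cg : String),
      pvFlushA (ls.foldl pvStepA (ss, gs, cs, cg)) = pvApp (ss, gs) (pvProcA ls cs cg) := by
  induction ls with
  | nil =>
      intro ss gs cs cg
      by_cases h : cs ≠ "" ∧ cg ≠ "" <;> simp [pvFlushA, pvProcA, pvEmit, pvApp, h]
  | cons l ls ih =>
      intro ss gs cs cg
      rw [List.foldl_cons]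
      by_cases hs : pvIsSub l
      · have hls : pvStepA (ss, gs, cs, cg) l =
            ((pvApp (ss, gs) (pvEmit cs cg)).1, (pvApp (ss, gs) (pvEmit cs cg)).2, pvVal l, "") := by
          simp [pvIsSub] at hs
          by_cases h : cs ≠ "" ∧ cg ≠ "" <;> simp [pvStepA, pvApp, pvEmit, pvVal, hs, h]
        rw [hls, ih]
        simp only [Prod.mk.eta]
        rw [← pvApp_assoc]
        simp [pvProcA, hs]
      · have hls : pvStepA (ss, gs, cs, cg) l = (ss, gs, cs, pvUpd cg l) := by
          simp [pvIsSub] at hs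
          by_cases hg : pvIsGoal l <;> simp [pvIsGoal] at hg <;>
            simp [pvStepA, pvUpd, pvVal, pvIsGoal, hs, hg]
        rw [hls, ih]
        simp [pvProcA, hs]

-- the last-goal fold equals the last filtered PDDL Goal line's value
theorem pvFoldUpd_eq (body : List String) :
    ∀ cg : String, body.foldl pvUpd cg =
      (match (body.filter pvIsGoal).getLast? with | some g => pvVal g | none => cg) := by
  induction body with
  | nil => intro cg; simp
  | cons l ls ih =>
      intro cg
      by_cases hg : pvIsGoal l
      · simp only [List.foldl_cons, ih, List.filter_cons, hg, if_pos]
        cases h : (ls.filter pvIsGoal).getLast? with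
        | some g => simp [List.getLast?_cons, h]
        | none =>
            have : ls.filter pvIsGoal = [] := by
              cases hh : ls.filter pvIsGoal with
              | nil => rfl
              | cons a t => rw [hh] at h; simp [List.getLast?_cons] at h
            simp [this, pvUpd, hg]
      -- non-goal line: dropped by the filter and leaves cg unchanged
      · simp [List.foldl_cons, ih, hg, pvUpd]

-- a run of non-header lines only updates the pending goal
theorem pvProcA_append (body : List String) (h : ∀ l ∈ body, pvIsSub l = false) :
    ∀ (tl : List String) (cs cg : String),
      pvProcA (body ++ tl) cs cg = pvProcA tl cs (body.foldl pvUpd cg) := by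
  induction body with
  | nil => intro tl cs cg; simp
  | cons l ls ih =>
      intro tl cs cg
      have hl : pvIsSub l = false := h l (by simp)
      have hls : ∀ l ∈ ls, pvIsSub l = false := fun x hx => h x (by simp [hx])
      simp [pvProcA, hl, ih hls]

-- a goal pending before any header is never emitted
theorem pvProcA_skip (ls : List String) :
    ∀ cg : String, pvProcA ls "" cg = pvProcA (ls.dropWhile pvNotSub) "" "" := by
  induction ls with
  | nil => intro cg; simp [pvProcA, pvEmit]
  | cons l ls ih =>
      intro cg
      by_cases hs : pvIsSub l
      · have : pvNotSub l = false := by simp [pvNotSub, pvIsSub] at hs ⊢; exact hs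
        simp [pvProcA, hs, this, pvEmit, pvApp_nil_left]
      · have : pvNotSub l = true := by simp [pvNotSub, pvIsSub] at hs ⊢; exact hs
        simp [pvProcA, hs, this, pvUpd, ih]

-- Main lemma: on a list with its preamble dropped, A's recursion is B's block map
theorem pvMain (n : Nat) : ∀ (ls : List String), ls.length ≤ n →
    pvProcA (ls.dropWhile pvNotSub) "" "" = pvRecB (pvBlocks (ls.dropWhile pvNotSub)) := by
  induction n with
  | zero =>
      intro ls h
      have : ls = [] := List.eq_nil_of_length_eq_zero (Nat.le_zero.mp h)
      simp [this, pvProcA, pvRecB, pvBlocks, pvEmit]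
  | succ n ih =>
      intro ls h
      cases hd : ls.dropWhile pvNotSub with
      | nil => simp [pvProcA, pvRecB, pvBlocks, pvEmit]
      | cons h0 rest =>
          have hhd : pvNotSub h0 = false := by
            have hne : ls.dropWhile pvNotSub ≠ [] := by simp [hd]
            have := List.head_dropWhile_not pvNotSub hne
            simpa [hd] using this
          have hsub : pvIsSub h0 = true := by
            simp [pvNotSub] at hhd; simp [pvIsSub, hhd]
          have hbody : ∀ l ∈ rest.takeWhile pvNotSub, pvIsSub l = false := by
            intro l hl
            have := List.mem_takeWhile_imp hl
            simp [pvNotSub] at this; simp [pvIsSub, this]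
          have hlen : rest.length ≤ n := by
            have h1 : (ls.dropWhile pvNotSub).length ≤ ls.length := List.length_dropWhile_le _ _
            rw [hd] at h1; simp at h1; omega
          calc pvProcA (h0 :: rest) "" ""
              = pvApp (pvEmit "" "") (pvProcA rest (pvVal h0) "") := by
                simp [pvProcA, hsub]
            _ = pvProcA rest (pvVal h0) "" := by simp [pvEmit, pvApp_nil_left]
            _ = pvProcA (rest.takeWhile pvNotSub ++ rest.dropWhile pvNotSub) (pvVal h0) "" := by
                rw [List.takeWhile_append_dropWhile]
            _ = pvProcA (rest.dropWhile pvNotSub) (pvVal h0)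
                  ((rest.takeWhile pvNotSub).foldl pvUpd "") :=
                pvProcA_append _ hbody _ _ _
            _ = pvRecB (pvBlocks (h0 :: rest)) := by
                rw [pvFoldUpd_eq, pvBlocks, pvRecB]
                cases hr : rest.dropWhile pvNotSub with
                | nil => simp [pvProcA, pvBlocks, pvRecB, pvEmit, pvApp]
                | cons h1 t1 =>
                    have hsub1 : pvIsSub h1 = true := by
                      have hne : rest.dropWhile pvNotSub ≠ [] := by simp [hr]
                      have h1f := List.head_dropWhile_not pvNotSub hne
                      simp [hr] at h1f
                      simp [pvNotSub] at h1f; simp [pvIsSub, h1f]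
                    have ihr := ih rest hlen
                    rw [hr] at ihr
                    rw [← ihr]
                    simp [pvProcA, hsub1, pvEmit, pvApp_nil_left]

-- B's foldl over blocks is pvRecB
theorem pvFoldB_eq (bs : List (String × List String)) :
    ∀ acc : List String × List String,
      bs.foldl (fun (acc : List String × List String) blk =>
        let sub := pvVal blk.1
        let glines := blk.2.filter (fun ln => PySem.Str.startswith ln "PDDL Goal")
        let goal := match glines.getLast? with | some g => pvVal g | none => ""
        if sub ≠ "" ∧ goal ≠ "" then (acc.1 ++ [sub], acc.2 ++ [goal]) else acc) acc
      = pvApp acc (pvRecB bs) := by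
  induction bs with
  | nil => intro acc; simp [pvRecB, pvApp]
  | cons b bs ih =>
      intro acc
      have hfun : (fun ln => PySem.Str.startswith ln "PDDL Goal") = pvIsGoal := rfl
      rw [hfun] at ih ⊢
      rw [List.foldl_cons, ih, pvRecB]
      simp only [pvEmit, pvApp]
      split_ifs with hc <;> simp

-- ===== VERDICT (by name: the statement is the Claim_ definition above) =====
set_option maxHeartbeats 1000000 in
theorem parse_subtasks_and_goals_spec : Claim_equal_parse_subtasks_and_goals := by
  intro pt _
  unfold Spec_parse_subtasks_and_goals parse_subtasks_and_goals parse_subtasks_and_goals_alt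
  show pvFlushA ((((PySem.Str.split? (PySem.Str.strip pt) "\n").getD []).foldl
      (fun st line₀ => pvStepA st (PySem.Str.strip line₀)) ([], [], "", ""))) = _
  rw [pvFoldB_eq, pvApp_nil_left,
    ← List.foldl_map (f := PySem.Str.strip) (g := pvStepA),
    pvFoldA_eq, pvApp_nil_left, pvProcA_skip]
  exact pvMain _ _ (le_refl _)
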